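-- pv_equiv track=rewrite | github.com/SNHillar/UTN-TpI2Maths | TPIntegrador2Maths/functions.py | interseccion
-- ===== SOURCE A (Python) =====
-- def interseccion(lista_dni):
--     conjunto_interseccion = set()
--     #recorremos la lista de DNI y agregamos los dígitos únicos a un conjunto
--     for i in range(len(lista_dni)):
--         conjunto_digitos = set(lista_dni[i])
--         if i == 0:
--             conjunto_interseccion = conjunto_digitos
--         else:
--             conjunto_interseccion.intersection_update(conjunto_digitos)
--     #retornamos el conjunto de dígitos únicos
--     return conjunto_interseccion
-- ===== SOURCE B (Python) =====
-- def interseccion(lista_dni):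
--     counts = {}
--     for dni in lista_dni:
--         for ch in set(dni):
--             counts[ch] = counts.get(ch, 0) + 1
--     total = len(lista_dni)
--     return {ch for ch, c in counts.items() if c == total}
-- ===== Notes on version B (the rewrite author's own statement) =====
-- stated objective: alternative
-- what changed: Replaces A's index-loop running set intersection by a single count-then-filter pass: a frequency dict counts in how many DNIs each character occurs, then the characters whose count equals len(lista_dni) are returned.
import Mathlib
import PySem

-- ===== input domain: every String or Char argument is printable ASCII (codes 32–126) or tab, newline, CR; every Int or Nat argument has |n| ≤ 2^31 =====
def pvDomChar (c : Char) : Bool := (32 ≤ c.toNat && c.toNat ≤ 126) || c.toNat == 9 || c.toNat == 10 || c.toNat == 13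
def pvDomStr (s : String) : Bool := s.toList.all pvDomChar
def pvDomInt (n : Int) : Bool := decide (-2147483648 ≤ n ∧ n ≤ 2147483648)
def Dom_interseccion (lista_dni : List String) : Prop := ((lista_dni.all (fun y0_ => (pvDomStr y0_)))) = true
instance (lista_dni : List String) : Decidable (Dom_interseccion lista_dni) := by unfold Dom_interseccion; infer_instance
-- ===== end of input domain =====

-- B computes the same set by one count-then-filter pass instead of A's running intersection (alternative decomposition, same cost).
-- Both Pythons return a set; equality of the Lean element lists holds because PySem.Set keeps first-insertion order on both sides.

-- set(s) for a Python string s: its characters as distinct single-character strings, first occurrences in order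
def pvCharSet (s : String) : PySem.Set String :=
  PySem.Set.ofList (s.toList.map (fun c => String.ofList [c]))

-- ===== PORT A =====
def interseccion (lista_dni : List String) : List String :=
  -- for i in range(len(lista_dni)): … (lista_dni[i] is always in range, so getD is exact)
  (List.range lista_dni.length).foldl
    (fun conjunto_interseccion i =>
      let conjunto_digitos := pvCharSet (lista_dni.getD i "")
      if i = 0 then conjunto_digitos
      else PySem.Set.inter conjunto_interseccion conjunto_digitos)
    PySem.Set.empty

-- ===== PORT B =====
def interseccion_alt (lista_dni : List String) : List String :=
  let counts : PySem.Dict String Int :=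
    lista_dni.foldl
      (fun counts dni =>
        (pvCharSet dni).foldl (fun counts ch => counts.modify ch 0 (· + 1)) counts)
      PySem.Dict.empty
  let total : Int := (lista_dni.length : Int)
  -- {ch for ch, c in counts.items() if c == total}
  PySem.Set.ofList ((counts.items.filter (fun p => p.2 = total)).map Prod.fst)

-- ===== PRECONDITION & SPEC =====
def Spec_interseccion (lista_dni : List String) (out : List String) : Prop := out = interseccion_alt lista_dni
instance (lista_dni : List String) (out : List String) : Decidable (Spec_interseccion lista_dni out) := by unfold Spec_interseccion; infer_instance

-- ===== CLAIM (what is proved, stated in full; the proofs are below) =====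
def Claim_equal_interseccion : Prop := ∀ (lista_dni : List String), Dom_interseccion lista_dni → Spec_interseccion lista_dni (interseccion lista_dni)

-- ===== LEMMAS AND PROOFS =====

lemma nodup_pvCharSet (s : String) : (pvCharSet s).Nodup := PySem.Set.nodup_ofList _

-- A's fold over range(len) equals a fold over the tail, starting from the head's character set
lemma foldl_range_inter (rest : List String) :
    ∀ acc : List String,
      (List.range rest.length).foldl
        (fun a i => PySem.Set.inter a (pvCharSet (rest.getD i ""))) acc
      = rest.foldl (fun a s => PySem.Set.inter a (pvCharSet s)) acc := by
  induction rest with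
  | nil => intro acc; rfl
  | cons d rest ih =>
      intro acc
      simp only [List.length_cons, List.range_succ_eq_map, List.foldl_cons, List.foldl_map,
        List.getD_cons_succ, List.getD_cons_zero]
      exact ih _

-- running intersection = filter by membership in every later set
lemma foldl_inter_eq_filter (rest : List String) :
    ∀ acc : List String,
      rest.foldl (fun a s => PySem.Set.inter a (pvCharSet s)) acc
      = acc.filter (fun ch => rest.all (fun s => (pvCharSet s).contains ch)) := by
  induction rest with
  | nil => intro acc; simp
  | cons d rest ih =>
      intro acc
      rw [List.foldl_cons, ih]
      show List.filter _ (List.filter (fun x => (pvCharSet d).contains x) acc) = _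
      rw [List.filter_filter]
      apply List.filter_congr
      intro x _
      simp [List.all_cons, Bool.and_comm]

lemma counts_eq_counter (lista : List String) :
    ∀ d : PySem.Dict String Int,
      lista.foldl
        (fun counts dni =>
          (pvCharSet dni).foldl (fun counts ch => counts.modify ch 0 (· + 1)) counts) d
      = (lista.flatMap pvCharSet).foldl (fun c x => c.modify x 0 (· + 1)) d := by
  induction lista with
  | nil => intro d; rfl
  | cons s lista ih => intro d; simp only [List.foldl_cons, List.flatMap_cons, List.foldl_append, ih]

lemma count_le_one_of_nodup {l : List String} (h : l.Nodup) (a : String) : l.count a ≤ 1 :=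
  List.nodup_iff_count_le_one.mp h a

lemma count_flatMap_le (ch : String) (rest : List String) :
    (rest.flatMap pvCharSet).count ch ≤ rest.length := by
  induction rest with
  | nil => simp
  | cons s rest ih =>
      simp only [List.flatMap_cons, List.count_append, List.length_cons]
      have := count_le_one_of_nodup (nodup_pvCharSet s) ch
      omega

lemma count_flatMap_eq_iff (ch : String) (rest : List String) :
    (rest.flatMap pvCharSet).count ch = rest.length ↔ ∀ s ∈ rest, ch ∈ pvCharSet s := by
  induction rest with
  | nil => simp
  | cons s rest ih =>
      simp only [List.flatMap_cons, List.count_append, List.length_cons, List.mem_cons]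
      constructor
      · intro h
        have h1 := count_le_one_of_nodup (nodup_pvCharSet s) ch
        have h2 := count_flatMap_le ch rest
        have hs : (pvCharSet s).count ch = 1 := by omega
        have hmem : ch ∈ pvCharSet s := by
          rw [← List.count_pos_iff]; omega
        have : (rest.flatMap pvCharSet).count ch = rest.length := by omega
        intro x hx
        rcases hx with rfl | hx
        · exact hmem
        · exact (ih.mp this) x hx
      · intro h
        have hmem : ch ∈ pvCharSet s := h s (Or.inl rfl)
        have hs : (pvCharSet s).count ch = 1 := by
          have h1 := count_le_one_of_nodup (nodup_pvCharSet s) ch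
          have : 0 < (pvCharSet s).count ch := List.count_pos_iff.mpr hmem
          omega
        have : (rest.flatMap pvCharSet).count ch = rest.length :=
          ih.mpr (fun x hx => h x (Or.inr hx))
        omega

-- filtering an updated set by a predicate false on all genuinely new elements ignores the update
lemma filter_update (P : String → Bool) :
    ∀ (ys s : List String), (∀ x ∈ ys, P x = true → x ∈ s) →
      (PySem.Set.update s ys).filter P = s.filter P := by
  intro ys
  induction ys with
  | nil => intro s _; rfl
  | cons y ys ih =>
      intro s h
      show (PySem.Set.update (PySem.Set.add s y) ys).filter P = s.filter P
      by_cases hy : s.contains y = true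
      · rw [show PySem.Set.add s y = s from if_pos hy]
        exact ih s (fun x hx => h x (List.mem_cons_of_mem _ hx))
      · rw [show PySem.Set.add s y = s ++ [y] from if_neg hy]
        have hPy : P y = false := by
          by_contra hc
          have := h y (List.mem_cons_self) (by revert hc; cases P y <;> simp)
          exact hy (List.contains_iff_mem.mpr this)
        rw [ih (s ++ [y])
            (fun x hx hP => List.mem_append_left _ (h x (List.mem_cons_of_mem _ hx) hP)),
          List.filter_append]
        simp [hPy]

-- A on a nonempty list: the head's character set filtered by membership in every later set
lemma A_char (d0 : String) (rest : List String) :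
    interseccion (d0 :: rest)
      = (pvCharSet d0).filter (fun ch => rest.all fun s => (pvCharSet s).contains ch) := by
  unfold interseccion
  rw [List.length_cons, List.range_succ_eq_map, List.foldl_cons, List.foldl_map]
  simp only [List.getD_cons_zero, List.getD_cons_succ, Nat.succ_ne_zero, ite_false]
  rw [foldl_range_inter, foldl_inter_eq_filter]
  simp

-- B on a nonempty list reduces to the same filter
lemma B_char (d0 : String) (rest : List String) :
    interseccion_alt (d0 :: rest)
      = (pvCharSet d0).filter (fun ch => rest.all fun s => (pvCharSet s).contains ch) := by
  unfold interseccion_alt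
  rw [counts_eq_counter]
  show PySem.Set.ofList
      ((((PySem.Dict.counter ((d0 :: rest).flatMap pvCharSet)).items.filter
        (fun p => decide (p.2 = ((d0 :: rest).length : Int)))).map Prod.fst)) = _
  rw [PySem.Dict.items_counter, List.filter_map, List.map_map]
  have hmapfst : (Prod.fst ∘ fun k => (k, ((((d0 :: rest).flatMap pvCharSet).count k : Int))))
      = id := by funext k; rfl
  rw [hmapfst, List.map_id]
  set allChars := (d0 :: rest).flatMap pvCharSet with hall
  have hsplit : allChars = pvCharSet d0 ++ rest.flatMap pvCharSet := by
    simp [hall, List.flatMap_cons]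
  set P : String → Bool :=
    (fun p => decide (p.2 = ((d0 :: rest).length : Int))) ∘
      (fun k => (k, ((allChars.count k : Int)))) with hP
  have hPk : ∀ k, P k = decide ((allChars.count k : Int) = ((rest.length : Int) + 1)) := by
    intro k; simp [hP, List.length_cons]
  have hofl : PySem.Set.ofList allChars
      = PySem.Set.update (pvCharSet d0) (rest.flatMap pvCharSet) := by
    rw [hsplit, PySem.Set.ofList_append]
    have h0 : PySem.Set.ofList (pvCharSet d0) = pvCharSet d0 := PySem.Set.ofList_ofList _
    rw [h0]
  rw [hofl, filter_update P _ _ ?side]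
  case side =>
    intro x hx hPx
    by_contra hxd
    rw [hPk] at hPx
    have hcount : allChars.count x = (rest.flatMap pvCharSet).count x := by
      rw [hsplit, List.count_append, List.count_eq_zero_of_not_mem hxd, Nat.zero_add]
    have hle := count_flatMap_le x rest
    have : (allChars.count x : Int) = (rest.length : Int) + 1 := of_decide_eq_true hPx
    omega
  · rw [PySem.Set.ofList_eq_self_of_nodup _ ((nodup_pvCharSet d0).filter P)]
    apply List.filter_congr
    intro x hxd
    rw [hPk]
    have hc1 : (pvCharSet d0).count x = 1 := by
      have := count_le_one_of_nodup (nodup_pvCharSet d0) x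
      have := List.count_pos_iff.mpr hxd
      omega
    have hcount : allChars.count x = 1 + (rest.flatMap pvCharSet).count x := by
      rw [hsplit, List.count_append, hc1]
    have hle := count_flatMap_le x rest
    have hiff := count_flatMap_eq_iff x rest
    rcases Bool.eq_false_or_eq_true (rest.all fun s => (pvCharSet s).contains x) with hb | hb
    · rw [hb]
      apply decide_eq_true
      have hall : ∀ s ∈ rest, x ∈ pvCharSet s := by
        rw [List.all_eq_true] at hb
        intro s hs; exact List.contains_iff_mem.mp (hb s hs)
      have := hiff.mpr hall
      omega
    · rw [hb]
      apply decide_eq_false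
      intro hc
      have : (rest.flatMap pvCharSet).count x = rest.length := by omega
      have hall := hiff.mp this
      rw [List.all_eq_false] at hb
      rcases hb with ⟨s, hs, hcon⟩
      exact absurd (List.contains_iff_mem.mpr (hall s hs)) hcon

-- ===== VERDICT (by name: the statement is the Claim_ definition above) =====
theorem interseccion_spec : Claim_equal_interseccion := by
  intro lista _
  unfold Spec_interseccion
  cases lista with
  | nil => rfl
  | cons d0 rest => rw [A_char, B_char]
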